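-- pv_equiv track=rewrite | github.com/omichael/smallscheme | smallscheme/scheme.py | argstype
-- ===== SOURCE A (Python) =====
-- def argstype(args):
--     # FIXME: Unit test for argument types
--     arglist = [x for (x, _) in args]
--     argset = set(arglist)
--     if argset == {'int', 'float'} or argset == {'float'}:
--         return 'float'
--     elif argset == {'int'}:
--         return 'int'
--     else:
--         raise Exception("Bad numeric arg list: '%s'"
--                         % arglist)
-- ===== SOURCE B (Python) =====
-- def argstype(args):
--     RANK = {'int': 0, 'float': 1}
--     r = -1
--     for (x, _) in args:
--         r = max(r, RANK.get(x, 2))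
--     if not 0 <= r <= 1:
--         raise Exception("Bad numeric arg list: '%s'"
--                         % [x for (x, _) in args])
--     return ('int', 'float')[r]
-- ===== Notes on version B (the rewrite author's own statement) =====
-- stated objective: alternative
-- what changed: Replaces set construction and set-literal equality tests by an arithmetic lattice: each arg's type is mapped to a numeric rank (int=0, float=1, other=2), a running max is taken, and the answer is read off a result table indexed by the max.
import Mathlib
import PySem

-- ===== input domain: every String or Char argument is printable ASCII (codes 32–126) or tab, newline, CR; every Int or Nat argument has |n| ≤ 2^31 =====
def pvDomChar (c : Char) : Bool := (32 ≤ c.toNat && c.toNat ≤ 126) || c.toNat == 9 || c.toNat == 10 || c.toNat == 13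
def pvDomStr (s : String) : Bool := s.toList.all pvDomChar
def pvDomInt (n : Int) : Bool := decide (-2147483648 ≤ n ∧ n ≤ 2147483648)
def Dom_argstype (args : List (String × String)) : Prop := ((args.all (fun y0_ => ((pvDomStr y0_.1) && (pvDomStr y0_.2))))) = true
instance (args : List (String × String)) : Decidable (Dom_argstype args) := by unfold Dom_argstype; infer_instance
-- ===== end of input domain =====

-- B replaces A's set construction and set-literal comparisons by a numeric-rank lattice:
-- each type string maps to a rank (int=0, float=1, other=2), the running max is taken,
-- and the answer is read off a table indexed by the max (objective: alternative).

-- ===== PORT A =====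
-- raise Exception(...) is modelled by returning "" there; exactly those inputs are excluded by Pre_argstype
def argstype (args : List (String × String)) : String :=
  let arglist := args.map (fun p => p.1)
  let argset := PySem.Set.ofList arglist
  if PySem.Set.equal argset ["int", "float"] || PySem.Set.equal argset ["float"] then "float"
  else if PySem.Set.equal argset ["int"] then "int"
  else ""

-- ===== PORT B =====
-- RANK dict, running max r starting at -1; the raise is modelled by "" outside Pre_argstype;
-- ('int','float')[r] becomes the r == 0 / r == 1 table lookup
def argstype_alt (args : List (String × String)) : String :=
  let rank : PySem.Dict String Int := PySem.Dict.ofList [("int", 0), ("float", 1)]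
  let r := args.foldl (fun r p => max r (PySem.Dict.getD rank p.1 2)) (-1)
  if ¬ (0 ≤ r ∧ r ≤ 1) then ""
  else if r == 0 then "int" else "float"

-- ===== PRECONDITION & SPEC =====
-- Pre_ excludes exactly the inputs on which A raises Exception("Bad numeric arg list: …"):
-- the empty list and lists with a first component other than 'int'/'float' (B raises the same exception there).
def Pre_argstype (args : List (String × String)) : Prop :=
  args ≠ [] ∧ (args.all (fun p => p.1 == "int" || p.1 == "float")) = true
instance (args : List (String × String)) : Decidable (Pre_argstype args) := by unfold Pre_argstype; infer_instance
def pvWitness_argstype : (List (String × String)) := [("int", "x"), ("float", "y")]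
def Spec_argstype (args : List (String × String)) (out : String) : Prop := out = argstype_alt args
instance (args : List (String × String)) (out : String) : Decidable (Spec_argstype args out) := by unfold Spec_argstype; infer_instance

-- ===== CLAIM (what is proved, stated in full; the proofs are below) =====
def Claim_equal_argstype : Prop := ∀ (args : List (String × String)), Dom_argstype args → Pre_argstype args → Spec_argstype args (argstype args)

-- ===== LEMMAS AND PROOFS =====

theorem argstype_rank_val (x : String) :
    PySem.Dict.getD (PySem.Dict.ofList [("int", (0:Int)), ("float", 1)]) x 2 =
    if x == "int" then 0 else if x == "float" then 1 else 2 := by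
  have h : PySem.Dict.ofList [("int", (0:Int)), ("float", 1)] = PySem.Dict.mk [("int", 0), ("float", 1)] := rfl
  rw [h]
  simp [PySem.Dict.getD, PySem.Dict.get?]
  by_cases hi : x = "int" <;> by_cases hf : x = "float" <;>
    simp_all [List.find?]
  have h1 : ("int" == x) = false := by simp; exact fun e => hi e.symm
  have h2 : ("float" == x) = false := by simp; exact fun e => hf e.symm
  simp [h1, h2]

-- the running max of B, characterised on lists whose first components are all int/float
theorem argstype_fold_max (args : List (String × String)) (a : Int)
    (hall : ∀ p ∈ args, p.1 = "int" ∨ p.1 = "float") :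
    args.foldl (fun r p => max r (PySem.Dict.getD (PySem.Dict.ofList [("int", (0:Int)), ("float", 1)]) p.1 2)) a =
    if args.any (fun p => p.1 == "float") then max a 1
    else if args = [] then a else max a 0 := by
  induction args generalizing a with
  | nil => simp
  | cons h t ih =>
    rw [List.foldl_cons, ih _ (fun p hp => hall p (List.mem_cons_of_mem _ hp))]
    rw [argstype_rank_val]
    rcases hall h List.mem_cons_self with h1 | h1 <;>
    · simp only [List.any_cons, h1]
      by_cases hf : t.any (fun p => p.1 == "float") <;>
        by_cases ht : t = [] <;> simp_all

theorem argstype_A_char (args : List (String × String)) (hp : Pre_argstype args) :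
    argstype args = if args.any (fun p => p.1 == "float") then "float" else "int" := by
  obtain ⟨hne, hall⟩ := hp
  simp only [List.all_eq_true, Bool.or_eq_true, beq_iff_eq] at hall
  unfold argstype
  simp only []
  by_cases hf : args.any (fun p => p.1 == "float")
  · have hfm : ("float" : String) ∈ args.map (fun p => p.1) := by
      simp only [List.any_eq_true, beq_iff_eq] at hf
      obtain ⟨p, hpmem, hpe⟩ := hf
      exact List.mem_map.2 ⟨p, hpmem, hpe⟩
    have hcond : (PySem.Set.equal (PySem.Set.ofList (args.map (fun p => p.1))) ["int", "float"]
        || PySem.Set.equal (PySem.Set.ofList (args.map (fun p => p.1))) ["float"]) = true := by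
      by_cases hi : ("int" : String) ∈ args.map (fun p => p.1)
      · apply Bool.or_eq_true_iff.2; left
        rw [PySem.Set.equal_iff]
        intro x
        simp only [PySem.Set.mem_ofList, List.mem_map]
        constructor
        · rintro ⟨p, hpmem, rfl⟩
          rcases hall p hpmem with h | h <;> simp_all
        · intro hx
          rcases List.mem_pair.1 hx with rfl | rfl
          · exact List.mem_map.1 hi
          · exact List.mem_map.1 hfm
      · apply Bool.or_eq_true_iff.2; right
        rw [PySem.Set.equal_iff]
        intro x
        simp only [PySem.Set.mem_ofList, List.mem_map]
        constructor
        · rintro ⟨p, hpmem, rfl⟩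
          rcases hall p hpmem with h | h
          · exact absurd (List.mem_map.2 ⟨p, hpmem, by simpa using h⟩) hi
          · simp_all
        · intro hx
          simp only [List.mem_singleton] at hx
          subst hx
          exact List.mem_map.1 hfm
    simp [hf, hcond]
  · -- no float: every fst is "int", and args nonempty so "int" is in the set
    have hallint : ∀ p ∈ args, p.1 = "int" := by
      intro p hpmem
      rcases hall p hpmem with h | h
      · simpa using h
      · exact absurd (List.any_eq_true.2 ⟨p, hpmem, by simp [h]⟩) hf
    have him : ("int" : String) ∈ args.map (fun p => p.1) := by
      obtain ⟨p, rest, rfl⟩ := List.exists_cons_of_ne_nil hne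
      exact List.mem_map.2 ⟨p, List.mem_cons_self, hallint p List.mem_cons_self⟩
    have hfm : ("float" : String) ∉ args.map (fun p => p.1) := by
      intro hx
      obtain ⟨p, hpmem, hpe⟩ := List.mem_map.1 hx
      have := hallint p hpmem
      simp_all
    have h1 : PySem.Set.equal (PySem.Set.ofList (args.map (fun p => p.1))) ["int", "float"] = false := by
      rw [Bool.eq_false_iff]
      intro h
      rw [PySem.Set.equal_iff] at h
      have := (h "float").2 (by simp)
      rw [PySem.Set.mem_ofList] at this
      exact hfm this
    have h2 : PySem.Set.equal (PySem.Set.ofList (args.map (fun p => p.1))) ["float"] = false := by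
      rw [Bool.eq_false_iff]
      intro h
      rw [PySem.Set.equal_iff] at h
      have := (h "float").2 (by simp)
      rw [PySem.Set.mem_ofList] at this
      exact hfm this
    have h3 : PySem.Set.equal (PySem.Set.ofList (args.map (fun p => p.1))) ["int"] = true := by
      rw [PySem.Set.equal_iff]
      intro x
      simp only [PySem.Set.mem_ofList, List.mem_map, List.mem_singleton]
      constructor
      · rintro ⟨p, hpmem, rfl⟩; exact hallint p hpmem
      · rintro rfl; exact List.mem_map.1 him
    simp [hf, h1, h2, h3]

theorem argstype_B_char (args : List (String × String)) (hp : Pre_argstype args) :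
    argstype_alt args = if args.any (fun p => p.1 == "float") then "float" else "int" := by
  obtain ⟨hne, hall⟩ := hp
  simp only [List.all_eq_true, Bool.or_eq_true, beq_iff_eq] at hall
  unfold argstype_alt
  simp only [argstype_fold_max args (-1) hall]
  by_cases hf : args.any (fun p => p.1 == "float")
  · simp [hf]
  · simp [hf, hne]

-- ===== VERDICT (by name: the statement is the Claim_ definition above) =====
theorem argstype_spec : Claim_equal_argstype := by
  intro args _ hp
  unfold Spec_argstype
  rw [argstype_A_char args hp, argstype_B_char args hp]
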